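-- pv_equiv track=rewrite | github.com/naggeluide/scrape_stats | scrape_stats.py | fix_title
-- ===== SOURCE A (Python) =====
-- def fix_title(t):
--     fchars=[':','/','\\','?','*','[',']'] #or any other character forbidden to Excel... : \ / ? * [ ]
--     for f in fchars:
--         if f in t:
--             t=t.replace(f,'-')
--     if len(t) >31:
--         t=t[:31]
--     return t
-- ===== SOURCE B (Python) =====
-- def fix_title(t):
--     forbidden = {':', '/', '\\', '?', '*', '[', ']'}
--     return ''.join('-' if c in forbidden else c for c in t)[:31]
-- ===== Notes on version B (the rewrite author's own statement) =====
-- stated objective: idiomatic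
-- what changed: Replaces seven sequential whole-string replace scans (one per forbidden character) with a single pass over the input mapping each character through a forbidden-set membership test, then applies the [:31] truncation unconditionally.
import Mathlib
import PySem

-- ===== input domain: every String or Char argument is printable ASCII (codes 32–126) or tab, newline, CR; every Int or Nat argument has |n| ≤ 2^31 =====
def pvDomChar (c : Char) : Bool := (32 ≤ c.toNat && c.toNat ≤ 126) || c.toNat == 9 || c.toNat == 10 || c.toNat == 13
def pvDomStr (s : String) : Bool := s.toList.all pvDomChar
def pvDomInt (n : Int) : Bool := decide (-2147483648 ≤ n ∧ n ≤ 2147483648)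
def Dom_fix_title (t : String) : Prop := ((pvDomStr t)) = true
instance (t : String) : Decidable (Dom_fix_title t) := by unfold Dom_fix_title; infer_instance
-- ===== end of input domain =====

-- B replaces A's seven sequential whole-string replace scans with one pass mapping each
-- character through a forbidden-set membership test (objective: idiomatic single pass).

-- ===== PORT A =====
def fix_title (t : String) : String :=
  let fchars : List String := [":", "/", "\\", "?", "*", "[", "]"]
  let t := fchars.foldl (fun t f => if PySem.Str.isIn f t then PySem.Str.replace t f "-" else t) t
  if 31 < PySem.Str.len t then PySem.Str.slice t none (some 31) else t

-- ===== PORT B =====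
def fix_title_alt (t : String) : String :=
  let forbidden : PySem.Set Char := PySem.Set.ofList [':', '/', '\\', '?', '*', '[', ']']
  PySem.Str.slice (String.ofList (t.toList.map (fun c => if forbidden.contains c then '-' else c))) none (some 31)

-- ===== PRECONDITION & SPEC =====
def Spec_fix_title (t : String) (out : String) : Prop := out = fix_title_alt t
instance (t : String) (out : String) : Decidable (Spec_fix_title t out) := by unfold Spec_fix_title; infer_instance

-- ===== CLAIM (what is proved, stated in full; the proofs are below) =====
def Claim_equal_fix_title : Prop := ∀ (t : String), Dom_fix_title t → Spec_fix_title t (fix_title t)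

-- ===== LEMMAS AND PROOFS =====

-- replace with a single-char pattern is a character map
theorem replace_go_single (c d : Char) :
    ∀ (fuel : Nat) (l acc : List Char), l.length ≤ fuel →
      PySem.Chars.replace.go [c] [d] fuel l acc
        = acc.reverse ++ l.map (fun x => if x = c then d else x) := by
  intro fuel
  induction fuel with
  | zero =>
      intro l acc h
      have : l = [] := List.eq_nil_of_length_eq_zero (Nat.le_zero.mp h)
      subst this; simp [PySem.Chars.replace.go]
  | succ n ih =>
      intro l acc h
      cases l with
      | nil => simp [PySem.Chars.replace.go]
      | cons x t =>
          by_cases hx : x = c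
          · subst hx
            have : List.isPrefixOf [x] (x :: t) = true := by
              simp [List.isPrefixOf]
            rw [PySem.Chars.replace.go]
            simp only [this, if_true, List.length_cons, List.length_nil,
              List.drop_succ_cons, List.drop_zero, List.reverse_cons, List.reverse_nil,
              List.nil_append, List.singleton_append]
            rw [ih t _ (by simpa using Nat.le_of_succ_le_succ h)]
            simp
          · have : List.isPrefixOf [c] (x :: t) = false := by
              simp only [List.isPrefixOf, Bool.and_eq_false_iff, beq_eq_false_iff_ne, ne_eq]
              exact Or.inl fun hcx => hx hcx.symm
            rw [PySem.Chars.replace.go]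
            simp only [this]
            rw [ih t _ (by simpa using Nat.le_of_succ_le_succ h)]
            simp [hx]

theorem replace_single (c d : Char) (s : List Char) :
    PySem.Chars.replace s [c] [d] = s.map (fun x => if x = c then d else x) := by
  rw [PySem.Chars.replace]
  rw [if_neg (by simp)]
  simpa using replace_go_single c d s.length s [] (le_refl _)

-- one step of A's fold (with or without the "in" guard) is a character map on toList
theorem step_map (c : Char) (f : String) (hf : f.toList = [c]) (s : String) :
    ((if PySem.Str.isIn f s then PySem.Str.replace s f "-" else s)).toList
      = s.toList.map (fun x => if x = c then '-' else x) := by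
  by_cases h : PySem.Str.isIn f s = true
  · rw [if_pos h]
    rw [PySem.Str.toList_replace, hf]
    simpa using replace_single c '-' s.toList
  · rw [if_neg h]
    have hinf : ¬ ([c] <:+: s.toList) := by
      intro hc
      exact h ((PySem.Str.isIn_iff_infix _ _).mpr (by rw [hf]; simpa using hc))
    have hmem : c ∉ s.toList := by
      intro hm
      exact hinf ((List.singleton_infix_iff c s.toList).mpr hm)
    symm
    calc s.toList.map (fun x => if x = c then '-' else x)
        = s.toList.map id := by
          apply List.map_congr_left
          intro x hx
          have : x ≠ c := fun hxc => hmem (hxc ▸ hx)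
          simp [this]
      _ = s.toList := List.map_id _

theorem comp_eq (x : Char) :
    (fun y => if y = ']' then '-' else y)
      ((fun y => if y = '[' then '-' else y)
      ((fun y => if y = '*' then '-' else y)
      ((fun y => if y = '?' then '-' else y)
      ((fun y => if y = '\\' then '-' else y)
      ((fun y => if y = '/' then '-' else y)
      ((fun y => if y = ':' then '-' else y) x))))))
      = (if (PySem.Set.ofList [':', '/', '\\', '?', '*', '[', ']'] : PySem.Set Char).contains x
          then '-' else x) := by
  have hc : (PySem.Set.ofList [':', '/', '\\', '?', '*', '[', ']'] : PySem.Set Char).contains x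
      = decide (x ∈ ([':', '/', '\\', '?', '*', '[', ']'] : List Char)) := by
    rw [PySem.Set.contains_eq_listContains]
    simp [PySem.Set.mem_ofList]
  rw [hc]
  by_cases h1 : x = ':' <;> by_cases h2 : x = '/' <;> by_cases h3 : x = '\\' <;>
    by_cases h4 : x = '?' <;> by_cases h5 : x = '*' <;> by_cases h6 : x = '[' <;>
    by_cases h7 : x = ']' <;> simp_all

theorem trunc_eq (s : String) :
    (if 31 < PySem.Str.len s then PySem.Str.slice s none (some 31) else s)
      = PySem.Str.slice s none (some 31) := by
  split_ifs with h
  · rfl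
  · apply String.toList_inj.mp
    rw [PySem.Str.toList_slice, PySem.Chars.slice_eq_listSlice,
        PySem.List.slice_to _ (by norm_num)]
    symm
    apply List.take_of_length_le
    have hlen := le_of_not_gt h
    rw [PySem.Str.len_eq] at hlen
    omega

set_option maxHeartbeats 1000000 in
theorem fix_title_spec_aux (t : String) : fix_title t = fix_title_alt t := by
  unfold fix_title fix_title_alt
  dsimp only
  rw [List.foldl_cons, List.foldl_cons, List.foldl_cons, List.foldl_cons,
      List.foldl_cons, List.foldl_cons, List.foldl_cons, List.foldl_nil,
      trunc_eq]
  apply String.toList_inj.mp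
  rw [PySem.Str.toList_slice, PySem.Str.toList_slice,
      PySem.Chars.slice_eq_listSlice, PySem.Chars.slice_eq_listSlice,
      String.toList_ofList]
  rw [step_map ']' "]" rfl, step_map '[' "[" rfl, step_map '*' "*" rfl,
      step_map '?' "?" rfl, step_map '\\' "\\" rfl, step_map '/' "/" rfl,
      step_map ':' ":" rfl]
  simp only [List.map_map, Function.comp_def]
  rw [List.map_congr_left (fun x _ => comp_eq x)]

-- ===== VERDICT (by name: the statement is the Claim_ definition above) =====
theorem fix_title_spec : Claim_equal_fix_title := by
  intro t _
  exact fix_title_spec_aux t
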